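-- pv_equiv track=rewrite | github.com/n-patricia/VSR | data/data_util.py | generate_from_indices
-- ===== SOURCE A (Python) =====
-- def generate_from_indices(crt_idx, max_frame_num, num_frames,
--                           padding='reflection'):
--     assert num_frames % 2 == 1, 'num_frames should be an odd number'
--     assert padding in ('replicate', 'reflection', 'reflection_circle',
--                        'circle'), f'Wrong padding {padding}'
--     max_frame_num = max_frame_num - 1
--     num_pad = num_frames // 2
--
--     indices = []
--     for i in range(crt_idx - num_pad, crt_idx + num_pad + 1):
--         if i < 0:
--             if padding == 'replicate':
--                 pad_idx = 0
--             elif padding == 'reflection':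
--                 pad_idx = -i
--             elif padding == 'reflection_circle':
--                 pad_idx = crt_idx + num_pad - i
--             else:
--                 pad_idx = num_frames + i
--         elif i > max_frame_num:
--             if padding == 'replicate':
--                 pad_idx = max_frame_num
--             elif padding == 'reflection':
--                 pad_idx = max_frame_num * 2 - i
--             elif padding == 'reflection_circle':
--                 pad_idx = (crt_idx - num_pad) - (i - max_frame_num)
--             else:
--                 pad_idx = i - num_frames
--         else:
--             pad_idx = i
--         indices.append(pad_idx)
--
--     return indices
-- ===== SOURCE B (Python) =====
-- def generate_from_indices(crt_idx, max_frame_num, num_frames,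
--                           padding='reflection'):
--     assert num_frames % 2 == 1, 'num_frames should be an odd number'
--     assert padding in ('replicate', 'reflection', 'reflection_circle',
--                        'circle'), f'Wrong padding {padding}'
--     max_frame_num = max_frame_num - 1
--     num_pad = num_frames // 2
--     start = crt_idx - num_pad
--     stop = crt_idx + num_pad + 1
--
--     # segment descriptors: lengths of the left / right padded parts and
--     # the first raw index of the right part; each padded part is an
--     # arithmetic progression, so it is materialized directly with range()
--     # (or list repetition) instead of mapping a formula over indices.
--     nL = min(stop, 0) - start
--     r0 = max(max(start, 0), max_frame_num + 1)
--     nR = stop - r0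
--
--     if padding == 'replicate':
--         left = [0] * nL
--         right = [max_frame_num] * nR
--     elif padding == 'reflection':
--         left = list(range(-start, -start - nL, -1))
--         right = list(range(2 * max_frame_num - r0,
--                            2 * max_frame_num - r0 - nR, -1))
--     elif padding == 'reflection_circle':
--         left = list(range(stop - 1 - start, stop - 1 - start - nL, -1))
--         right = list(range(start + max_frame_num - r0,
--                            start + max_frame_num - r0 - nR, -1))
--     else:
--         left = list(range(start + num_frames, start + num_frames + nL))
--         right = list(range(r0 - num_frames, r0 - num_frames + nR))
--
--     return left + list(range(max(start, 0), min(stop, max_frame_num + 1))) + right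
-- ===== Notes on version B (the rewrite author's own statement) =====
-- stated objective: alternative
-- what changed: A walks the window index by index, deciding per element which padding formula to apply; B never applies a formula per element: it computes three segment descriptors (lengths and first values of the left-pad, middle and right-pad arithmetic progressions) and materializes each segment wholesale with range()/list repetition.
import Mathlib
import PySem

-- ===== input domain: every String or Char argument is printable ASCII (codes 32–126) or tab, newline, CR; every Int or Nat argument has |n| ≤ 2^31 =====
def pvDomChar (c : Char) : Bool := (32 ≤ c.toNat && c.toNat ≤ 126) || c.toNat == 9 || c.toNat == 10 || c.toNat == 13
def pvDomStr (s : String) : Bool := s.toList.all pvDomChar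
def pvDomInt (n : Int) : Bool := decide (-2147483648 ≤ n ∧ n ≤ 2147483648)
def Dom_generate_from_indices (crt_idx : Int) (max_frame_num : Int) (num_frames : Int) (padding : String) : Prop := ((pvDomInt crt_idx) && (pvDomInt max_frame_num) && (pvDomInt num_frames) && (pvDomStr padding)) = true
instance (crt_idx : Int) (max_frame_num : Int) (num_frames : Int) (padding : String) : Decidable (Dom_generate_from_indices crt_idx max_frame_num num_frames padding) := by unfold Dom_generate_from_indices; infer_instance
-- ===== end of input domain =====

-- B replaces A's per-element branch-and-apply loop by computing three segment
-- descriptors (lengths/endpoints) and materializing each padded segment wholesale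
-- as an arithmetic progression — objective: alternative decomposition.

-- ===== PORT A =====
def generate_from_indices (crt_idx : Int) (max_frame_num : Int) (num_frames : Int) (padding : String) : List Int :=
  let mfn := max_frame_num - 1
  let num_pad := PySem.Int.floordiv num_frames 2
  (PySem.List.pyRange (crt_idx - num_pad) (crt_idx + num_pad + 1) 1).foldl
    (fun indices i =>
      let pad_idx :=
        if i < 0 then
          if padding = "replicate" then 0
          else if padding = "reflection" then -i
          else if padding = "reflection_circle" then crt_idx + num_pad - i
          else num_frames + i
        else if i > mfn then
          if padding = "replicate" then mfn
          else if padding = "reflection" then mfn * 2 - i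
          else if padding = "reflection_circle" then (crt_idx - num_pad) - (i - mfn)
          else i - num_frames
        else i
      indices ++ [pad_idx]) []

-- ===== PORT B =====
-- Python's '[v] * n' is empty for n ≤ 0: List.replicate n.toNat is exact.
def generate_from_indices_alt (crt_idx : Int) (max_frame_num : Int) (num_frames : Int) (padding : String) : List Int :=
  let mfn := max_frame_num - 1
  let num_pad := PySem.Int.floordiv num_frames 2
  let start := crt_idx - num_pad
  let stop := crt_idx + num_pad + 1
  let nL := min stop 0 - start
  let r0 := max (max start 0) (mfn + 1)
  let nR := stop - r0
  let left :=
    if padding = "replicate" then List.replicate nL.toNat 0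
    else if padding = "reflection" then PySem.List.pyRange (-start) (-start - nL) (-1)
    else if padding = "reflection_circle" then PySem.List.pyRange (stop - 1 - start) (stop - 1 - start - nL) (-1)
    else PySem.List.pyRange (start + num_frames) (start + num_frames + nL) 1
  let right :=
    if padding = "replicate" then List.replicate nR.toNat mfn
    else if padding = "reflection" then PySem.List.pyRange (2 * mfn - r0) (2 * mfn - r0 - nR) (-1)
    else if padding = "reflection_circle" then PySem.List.pyRange (start + mfn - r0) (start + mfn - r0 - nR) (-1)
    else PySem.List.pyRange (r0 - num_frames) (r0 - num_frames + nR) 1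
  left ++ PySem.List.pyRange (max start 0) (min stop (mfn + 1)) 1 ++ right

-- ===== PRECONDITION & SPEC =====
-- Pre_ excludes exactly the inputs where A's asserts raise: even num_frames, or a
-- padding string outside the four accepted modes.
def Pre_generate_from_indices (crt_idx : Int) (max_frame_num : Int) (num_frames : Int) (padding : String) : Prop :=
  PySem.Int.mod num_frames 2 = 1 ∧
    (padding = "replicate" ∨ padding = "reflection" ∨ padding = "reflection_circle" ∨ padding = "circle")
instance (crt_idx : Int) (max_frame_num : Int) (num_frames : Int) (padding : String) : Decidable (Pre_generate_from_indices crt_idx max_frame_num num_frames padding) := by unfold Pre_generate_from_indices; infer_instance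

def pvWitness_generate_from_indices : Int × Int × Int × String := (1, 5, 3, "reflection")

def Spec_generate_from_indices (crt_idx : Int) (max_frame_num : Int) (num_frames : Int) (padding : String) (out : List Int) : Prop := out = generate_from_indices_alt crt_idx max_frame_num num_frames padding
instance (crt_idx : Int) (max_frame_num : Int) (num_frames : Int) (padding : String) (out : List Int) : Decidable (Spec_generate_from_indices crt_idx max_frame_num num_frames padding out) := by unfold Spec_generate_from_indices; infer_instance

-- ===== CLAIM =====
def Claim_equal_generate_from_indices : Prop := ∀ (crt_idx : Int) (max_frame_num : Int) (num_frames : Int) (padding : String), Dom_generate_from_indices crt_idx max_frame_num num_frames padding → Pre_generate_from_indices crt_idx max_frame_num num_frames padding → Spec_generate_from_indices crt_idx max_frame_num num_frames padding (generate_from_indices crt_idx max_frame_num num_frames padding)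

-- ===== LEMMAS AND PROOFS =====

-- two ascending pyRanges are equal when endpoints coincide or both are empty
lemma pyRange_eq_of (a b c d : Int) (h : (a = c ∧ b = d) ∨ (b ≤ a ∧ d ≤ c)) :
    PySem.List.pyRange a b 1 = PySem.List.pyRange c d 1 := by
  rcases h with ⟨h1, h2⟩ | ⟨h1, h2⟩
  · rw [h1, h2]
  · rw [PySem.List.pyRange_one_eq_nil h1, PySem.List.pyRange_one_eq_nil h2]

-- two descending pyRanges are equal when endpoints coincide or both are empty
lemma pyRange_neg_eq_of (a b c d : Int) (h : (a = c ∧ b = d) ∨ (a ≤ b ∧ c ≤ d)) :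
    PySem.List.pyRange a b (-1) = PySem.List.pyRange c d (-1) := by
  rcases h with ⟨h1, h2⟩ | ⟨h1, h2⟩
  · rw [h1, h2]
  · rw [PySem.List.pyRange_neg_one_eq_nil h1, PySem.List.pyRange_neg_one_eq_nil h2]

lemma map_sub_pyRange (a b c : Int) :
    (PySem.List.pyRange a b 1).map (fun i => c - i) = PySem.List.pyRange (c - a) (c - b) (-1) := by
  rw [PySem.List.pyRange_one, PySem.List.pyRange_neg_one, List.map_map]
  rw [show (c - a - (c - b)).toNat = (b - a).toNat by omega]
  refine List.map_congr_left ?_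
  intro k _
  simp only [Function.comp_apply]
  omega

lemma map_add_pyRange (a b c : Int) :
    (PySem.List.pyRange a b 1).map (fun i => c + i) = PySem.List.pyRange (c + a) (c + b) 1 := by
  rw [PySem.List.pyRange_one, PySem.List.pyRange_one, List.map_map]
  rw [show (c + b - (c + a)).toNat = (b - a).toNat by omega]
  refine List.map_congr_left ?_
  intro k _
  simp only [Function.comp_apply]
  omega

lemma map_subc_pyRange (a b c : Int) :
    (PySem.List.pyRange a b 1).map (fun i => i - c) = PySem.List.pyRange (a - c) (b - c) 1 := by
  rw [PySem.List.pyRange_one, PySem.List.pyRange_one, List.map_map]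
  rw [show (b - c - (a - c)).toNat = (b - a).toNat by omega]
  refine List.map_congr_left ?_
  intro k _
  simp only [Function.comp_apply]
  omega

lemma map_const_pyRange (a b v : Int) :
    (PySem.List.pyRange a b 1).map (fun _ => v) = List.replicate (b - a).toNat v := by
  rw [PySem.List.pyRange_one, List.map_map]
  simp [Function.comp_def]

-- A's one-pass branch loop, as a map, splits into three contiguous segments
lemma A_split (f fL fR : Int → Int) (start stop mfn : Int)
    (hL : ∀ i, i < 0 → f i = fL i)
    (hM : ∀ i, 0 ≤ i → i ≤ mfn → f i = i)
    (hR : ∀ i, 0 ≤ i → mfn < i → f i = fR i) :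
    (PySem.List.pyRange start stop 1).map f
      = (PySem.List.pyRange start (max start (min stop 0)) 1).map fL
        ++ PySem.List.pyRange (max start 0) (min stop (mfn + 1)) 1
        ++ (PySem.List.pyRange (min stop (max (max start 0) (mfn + 1))) stop 1).map fR := by
  by_cases hle : start ≤ stop
  · rw [PySem.List.pyRange_one_append start (max start (min stop 0)) stop (le_max_left _ _) (by omega),
        PySem.List.pyRange_one_append (max start (min stop 0))
          (min stop (max (max start 0) (mfn + 1))) stop (by omega) (min_le_left _ _)]
    simp only [List.map_append, ← List.append_assoc]
    congr 1
    · congr 1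
      · refine List.map_congr_left ?_
        intro i hi
        rw [PySem.List.mem_pyRange_one] at hi
        exact hL i (by omega)
      · rw [pyRange_eq_of (max start (min stop 0)) (min stop (max (max start 0) (mfn + 1)))
              (max start 0) (min stop (mfn + 1)) (by omega)]
        conv_rhs => rw [← List.map_id (PySem.List.pyRange (max start 0) (min stop (mfn + 1)) 1)]
        refine List.map_congr_left ?_
        intro i hi
        rw [PySem.List.mem_pyRange_one] at hi
        exact hM i (by omega) (by omega)
    · refine List.map_congr_left ?_
      intro i hi
      rw [PySem.List.mem_pyRange_one] at hi
      exact hR i (by omega) (by omega)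
  · rw [PySem.List.pyRange_one_eq_nil (by omega : stop ≤ start),
        PySem.List.pyRange_one_eq_nil (by omega : max start (min stop 0) ≤ start),
        PySem.List.pyRange_one_eq_nil (by omega : min stop (mfn + 1) ≤ max start 0),
        PySem.List.pyRange_one_eq_nil (by omega : stop ≤ min stop (max (max start 0) (mfn + 1)))]
    simp

-- ===== VERDICT =====
theorem generate_from_indices_spec : Claim_equal_generate_from_indices := by
  intro crt_idx max_frame_num num_frames padding _ hpre
  obtain ⟨-, hpad⟩ := hpre
  unfold Spec_generate_from_indices generate_from_indices generate_from_indices_alt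
  rcases hpad with rfl | rfl | rfl | rfl <;>
    simp only [PySem.List.foldl_append_singleton_eq_map, List.nil_append,
      String.reduceEq, if_true, if_false]
  · -- replicate
    refine (A_split _ (fun _ => (0 : Int)) (fun _ => max_frame_num - 1) _ _ (max_frame_num - 1)
        (fun i h => by simp only [if_pos h])
        (fun i h0 h1 => by simp only [if_neg (show ¬ i < 0 by omega), if_neg (show ¬ i > max_frame_num - 1 by omega)])
        (fun i h0 h1 => by simp only [if_neg (show ¬ i < 0 by omega), if_pos (show i > max_frame_num - 1 by omega)])).trans ?_
    congr 1
    · congr 1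
      rw [map_const_pyRange]; congr 1; omega
    · rw [map_const_pyRange]; congr 1; omega
  · -- reflection
    refine (A_split _ (fun i => (0 : Int) - i) (fun i => (max_frame_num - 1) * 2 - i) _ _ (max_frame_num - 1)
        (fun i h => by simp only [if_pos h]; omega)
        (fun i h0 h1 => by simp only [if_neg (show ¬ i < 0 by omega), if_neg (show ¬ i > max_frame_num - 1 by omega)])
        (fun i h0 h1 => by simp only [if_neg (show ¬ i < 0 by omega), if_pos (show i > max_frame_num - 1 by omega)])).trans ?_
    congr 1
    · congr 1
      rw [map_sub_pyRange]; exact pyRange_neg_eq_of _ _ _ _ (by omega)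
    · rw [map_sub_pyRange]; exact pyRange_neg_eq_of _ _ _ _ (by omega)
  · -- reflection_circle
    refine (A_split _ (fun i => crt_idx + PySem.Int.floordiv num_frames 2 - i)
        (fun i => (crt_idx - PySem.Int.floordiv num_frames 2 + (max_frame_num - 1)) - i) _ _ (max_frame_num - 1)
        (fun i h => by simp only [if_pos h])
        (fun i h0 h1 => by simp only [if_neg (show ¬ i < 0 by omega), if_neg (show ¬ i > max_frame_num - 1 by omega)])
        (fun i h0 h1 => by simp only [if_neg (show ¬ i < 0 by omega), if_pos (show i > max_frame_num - 1 by omega)]; omega)).trans ?_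
    congr 1
    · congr 1
      rw [map_sub_pyRange]; exact pyRange_neg_eq_of _ _ _ _ (by omega)
    · rw [map_sub_pyRange]; exact pyRange_neg_eq_of _ _ _ _ (by omega)
  · -- circle
    refine (A_split _ (fun i => num_frames + i) (fun i => i - num_frames) _ _ (max_frame_num - 1)
        (fun i h => by simp only [if_pos h])
        (fun i h0 h1 => by simp only [if_neg (show ¬ i < 0 by omega), if_neg (show ¬ i > max_frame_num - 1 by omega)])
        (fun i h0 h1 => by simp only [if_neg (show ¬ i < 0 by omega), if_pos (show i > max_frame_num - 1 by omega)])).trans ?_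
    congr 1
    · congr 1
      rw [map_add_pyRange]; exact pyRange_eq_of _ _ _ _ (by omega)
    · rw [map_subc_pyRange]; exact pyRange_eq_of _ _ _ _ (by omega)
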